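-- pv_equiv track=rewrite | github.com/soyukke/lean-unsolved | scripts/collatz_padic.py | find_fixed_and_periodic
-- ===== SOURCE A (Python) =====
-- from collections import defaultdict, Counter
--
-- def v2(n):
--     """n の2-adic valuation"""
--     if n == 0:
--         return float('inf')
--     count = 0
--     while n % 2 == 0:
--         n //= 2
--         count += 1
--     return count
--
-- def syracuse_mod(n, mod):
--     """Syracuse を mod で計算。n は奇数かつ mod 内。戻り値も mod で返す"""
--     val = 3 * n + 1
--     v = v2(val)
--     result = val // (2 ** v)
--     return result % mod
--
-- def find_fixed_and_periodic(k, max_period=10):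
--     """mod 2^k での Syracuse 不動点と周期点を探索"""
--     mod = 2 ** k
--     fixed = []
--     periodic = defaultdict(list)  # period -> list of starting points
--
--     for r in range(1, mod, 2):
--         x = r
--         orbit = [x]
--         seen = {x: 0}
--         for step in range(1, max_period + 1):
--             x = syracuse_mod(x, mod)
--             if x % 2 == 0:
--                 # 奇数に戻す
--                 while x % 2 == 0 and x > 0:
--                     x = x // 2
--                 if x == 0:
--                     break
--             if x in seen:
--                 period = step - seen[x]
--                 if period == 1 and seen[x] == 0:
--                     pass  # will be caught below
--                 periodic[period].append(r)
--                 break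
--             seen[x] = step
--             orbit.append(x)
--
--         # 不動点チェック: T(r) ≡ r (mod 2^k)
--         if syracuse_mod(r, mod) == r:
--             fixed.append(r)
--
--     return fixed, periodic
-- ===== SOURCE B (Python) =====
-- def find_fixed_and_periodic(k, max_period=10):
--     """mod 2^k での Syracuse 不動点と周期点を探索 (table + generate-then-scan)"""
--     mod = 2 ** k
--     f = {}  # r -> syracuse_mod(r, mod)
--     g = {}  # r -> odd-reduced successor (0 if the orbit dies)
--     for r in range(1, mod, 2):
--         t = 3 * r + 1
--         while t % 2 == 0:
--             t //= 2
--         t %= mod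
--         f[r] = t
--         while t % 2 == 0 and t > 0:
--             t //= 2
--         g[r] = t
--     fixed = [r for r in range(1, mod, 2) if f[r] == r]
--     periodic = {}
--     for r in range(1, mod, 2):
--         # phase 1: generate the orbit up front (no detection while generating)
--         # a repeat or a dead 0 occurs within mod//2 steps (there are only mod//2 odd
--         # residues), so generating min(max_period, mod//2) steps is enough
--         x = r
--         zs = [r]
--         for _ in range(min(max_period, mod // 2)):
--             x = g.get(x, 0)
--             zs.append(x)
--         # phase 2: scan for the first repeat (stop at a dead orbit)
--         prefix = [zs[0]]
--         for y in zs[1:]: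
--             if y == 0:
--                 break
--             if y in prefix:
--                 periodic.setdefault(len(prefix) - prefix.index(y), []).append(r)
--                 break
--             prefix.append(y)
--     return fixed, periodic
-- ===== Notes on version B (the rewrite author's own statement) =====
-- stated objective: alternative
-- what changed: B precomputes the Syracuse map and its odd-reduced successor as tables in one pass over the odd residues, gets the fixed points as a filter over the f-table, and for each residue generates the orbit up front from the g-table (capped at min(max_period, mod//2) steps, enough by pigeonhole) and then scans it for the first repeat, instead of A's per-step recomputation of syracuse_mod and online seen-dict detection inside the generation loop.
import Mathlib
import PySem

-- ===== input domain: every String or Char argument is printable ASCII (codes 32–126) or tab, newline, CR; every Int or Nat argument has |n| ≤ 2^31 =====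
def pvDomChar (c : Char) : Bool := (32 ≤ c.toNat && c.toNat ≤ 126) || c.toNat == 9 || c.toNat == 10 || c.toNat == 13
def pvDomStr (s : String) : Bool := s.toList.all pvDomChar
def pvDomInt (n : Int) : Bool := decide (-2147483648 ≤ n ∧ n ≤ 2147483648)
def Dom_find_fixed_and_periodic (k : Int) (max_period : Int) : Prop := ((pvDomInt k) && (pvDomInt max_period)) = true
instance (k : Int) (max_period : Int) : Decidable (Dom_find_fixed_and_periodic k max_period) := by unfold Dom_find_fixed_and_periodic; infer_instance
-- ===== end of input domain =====

-- B precomputes the Syracuse/successor tables once, then generates each orbit up front (capped at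
-- min(max_period, mod//2) steps, enough by pigeonhole) and scans it for the first repeat
-- (alternative decomposition).

-- termination helpers for the while-loops of both ports (cited by their decreasing_by)
lemma pv_fd2 {x m : Int} (hm : x = 2 * m) : PySem.Int.floordiv x 2 = m := by
  rw [PySem.Int.floordiv_eq_ediv_of_pos (by omega : (0:Int) < 2), hm,
      Int.mul_ediv_cancel_left _ (by omega : (2:Int) ≠ 0)]

lemma pv_half_lt {x : Int} (h : PySem.Int.mod x 2 = 0) (hx : x ≠ 0) :
    (PySem.Int.floordiv x 2).natAbs < x.natAbs := by
  obtain ⟨m, hm⟩ := (PySem.Int.mod_eq_zero_iff_dvd x 2).mp h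
  rw [pv_fd2 hm]
  omega

-- ===== PORT A =====

-- `while n % 2 == 0: n //= 2; count += 1` of v2; the `n ≠ 0` conjunct is a totality guard only
-- (Python's loop diverges at 0, which v2 returns on before the loop)
def pv_v2go (n : Int) (count : Int) : Int :=
  if h : PySem.Int.mod n 2 = 0 ∧ n ≠ 0 then pv_v2go (PySem.Int.floordiv n 2) (count + 1) else count
termination_by n.natAbs
decreasing_by exact pv_half_lt h.1 h.2

-- Python returns float('inf') at n = 0; unreachable here (v2 is only applied to 3*x+1 with x ≥ 1), so: 0
def pv_v2 (n : Int) : Int := if n = 0 then 0 else pv_v2go n 0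

def pv_syracuse_mod (n m : Int) : Int :=
  let val := 3 * n + 1
  let v := pv_v2 val
  let result := PySem.Int.floordiv val (2 ^ v.toNat)
  PySem.Int.mod result m

-- `while x % 2 == 0 and x > 0: x //= 2`
def pv_reduceOdd (x : Int) : Int :=
  if h : PySem.Int.mod x 2 = 0 ∧ 0 < x then pv_reduceOdd (PySem.Int.floordiv x 2) else x
termination_by x.natAbs
decreasing_by exact pv_half_lt h.1 (by omega)

-- A's inner `for step in range(1, max_period+1)` loop; returns the updated `periodic`
def pv_innerA (m r : Int) : List Int → Int → PySem.Dict Int Int → List Int → PySem.Dict Int (List Int) → PySem.Dict Int (List Int)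
  | [], _x, _seen, _orbit, periodic => periodic
  | step :: rest, x, seen, orbit, periodic =>
    let x1 := pv_syracuse_mod x m
    let x2 := if PySem.Int.mod x1 2 = 0 then pv_reduceOdd x1 else x1
    if x2 = 0 then periodic   -- `if x == 0: break` (x2 = 0 can only arise in the even branch)
    else
      match PySem.Dict.get? seen x2 with
      | some s =>
          -- periodic[step - s].append(r)  (defaultdict(list))
          PySem.Dict.insert periodic (step - s) (PySem.Dict.getD periodic (step - s) [] ++ [r])
      | none => pv_innerA m r rest x2 (PySem.Dict.insert seen x2 step) (orbit ++ [x2]) periodic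

def find_fixed_and_periodic (k : Int) (max_period : Int) : List Int × (List (Int × List Int)) :=
  -- mod = 2 ** k; Pre_ requires 0 ≤ k (for k < 0 Python's 2**k is a float and range() raises TypeError)
  let m := (2 : Int) ^ k.toNat
  let res := (PySem.List.pyRange 1 m 2).foldl
    (fun (acc : List Int × PySem.Dict Int (List Int)) r =>
      (if pv_syracuse_mod r m = r then acc.1 ++ [r] else acc.1,
       pv_innerA m r (PySem.List.pyRange 1 (max_period + 1) 1) r
         (PySem.Dict.insert PySem.Dict.empty r 0) [r] acc.2))
    ([], PySem.Dict.empty)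
  (res.1, res.2.items)

-- ===== PORT B =====

-- B's odd-reduction while loop (used twice in Source B; in the first use `0 < t` is a totality guard
-- only: there t = 3*r+1 > 0)
def pvB_red (t : Int) : Int :=
  if h : PySem.Int.mod t 2 = 0 ∧ 0 < t then pvB_red (PySem.Int.floordiv t 2) else t
termination_by t.natAbs
decreasing_by exact pv_half_lt h.1 (by omega)

-- the f/g table-building pass of Source B
def pvB_tables (m : Int) : PySem.Dict Int Int × PySem.Dict Int Int :=
  (PySem.List.pyRange 1 m 2).foldl
    (fun (fg : PySem.Dict Int Int × PySem.Dict Int Int) r =>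
      let t1 := PySem.Int.mod (pvB_red (3 * r + 1)) m
      (fg.1.insert r t1, fg.2.insert r (pvB_red t1)))
    (PySem.Dict.empty, PySem.Dict.empty)

-- Source B's scan phase: `for y in zs[1:]` with accumulator `prefix`
def pvB_scan (r : Int) : List Int → List Int → PySem.Dict Int (List Int) → PySem.Dict Int (List Int)
  | [], _pre, periodic => periodic
  | y :: rest, pre, periodic =>
    if y = 0 then periodic
    else if y ∈ pre then
      -- periodic.setdefault(len(prefix) - prefix.index(y), []).append(r)
      PySem.Dict.insert periodic ((pre.length : Int) - (((PySem.List.index? pre y).getD 0 : Nat) : Int))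
        (PySem.Dict.getD periodic ((pre.length : Int) - (((PySem.List.index? pre y).getD 0 : Nat) : Int)) [] ++ [r])
    else pvB_scan r rest (pre ++ [y]) periodic

def find_fixed_and_periodic_alt (k : Int) (max_period : Int) : List Int × (List (Int × List Int)) :=
  let m := (2 : Int) ^ k.toNat
  let fg := pvB_tables m
  let fixed := (PySem.List.pyRange 1 m 2).filter (fun r => PySem.Dict.getD fg.1 r 0 == r)
  let periodic := (PySem.List.pyRange 1 m 2).foldl
    (fun periodic r =>
      -- a repeat or a dead 0 occurs within mod//2 steps, so Source B generates
      -- min(max_period, mod//2) of them; zs.append(x) ported as prepend + final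
      -- reverse (the same list, built in linear time)
      let zs := (((PySem.List.pyRange 0 (min max_period (PySem.Int.floordiv m 2)) 1).foldl
        (fun (p : Int × List Int) _ =>
          (PySem.Dict.getD fg.2 p.1 0, PySem.Dict.getD fg.2 p.1 0 :: p.2)) (r, [r])).2).reverse
      pvB_scan r (PySem.List.slice zs (some 1) none) [PySem.List.pyGetD zs 0 0] periodic)
    PySem.Dict.empty
  (fixed, periodic.items)

-- ===== PRECONDITION & SPEC =====
-- Pre_ excludes k < 0 only: there Python's 2**k is a float and range(1, 2**k, 2) raises TypeError.
def Pre_find_fixed_and_periodic (k : Int) (max_period : Int) : Prop := 0 ≤ k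
instance (k : Int) (max_period : Int) : Decidable (Pre_find_fixed_and_periodic k max_period) := by unfold Pre_find_fixed_and_periodic; infer_instance
def pvWitness_find_fixed_and_periodic : Int × Int := (4, 6)

def Spec_find_fixed_and_periodic (k : Int) (max_period : Int) (out : List Int × (List (Int × List Int))) : Prop := out = find_fixed_and_periodic_alt k max_period
instance (k : Int) (max_period : Int) (out : List Int × (List (Int × List Int))) : Decidable (Spec_find_fixed_and_periodic k max_period out) := by unfold Spec_find_fixed_and_periodic; infer_instance

-- ===== CLAIM (what is proved, stated in full; the proofs are below) =====
def Claim_equal_find_fixed_and_periodic : Prop := ∀ (k : Int) (max_period : Int), Dom_find_fixed_and_periodic k max_period → Pre_find_fixed_and_periodic k max_period → Spec_find_fixed_and_periodic k max_period (find_fixed_and_periodic k max_period)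

-- ===== LEMMAS AND PROOFS =====

-- odd residues mod m
def pvOddRes (m x : Int) : Prop := 1 ≤ x ∧ x < m ∧ PySem.Int.mod x 2 = 1

-- one transition of A's inner loop (syracuse then odd-reduction)
def pvStep (m x : Int) : Int := pv_reduceOdd (pv_syracuse_mod x m)

-- the orbit continuation [G x, G (G x), …] of length n
def pvChain (G : Int → Int) : Int → Nat → List Int
  | _, 0 => []
  | x, n+1 => G x :: pvChain G (G x) n

-- [t, t+1, …, t+n-1]
def pvSteps : Int → Nat → List Int
  | _, 0 => []
  | t, n+1 => t :: pvSteps (t+1) n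

lemma pv_red_eq (x : Int) : pvB_red x = pv_reduceOdd x := by
  rw [pvB_red, pv_reduceOdd]
  split_ifs with h
  · exact pv_red_eq _
  · rfl
termination_by x.natAbs
decreasing_by exact pv_half_lt h.1 (by omega)

lemma pv_reduceOdd_of_not {x : Int} (h : ¬(PySem.Int.mod x 2 = 0 ∧ 0 < x)) : pv_reduceOdd x = x := by
  rw [pv_reduceOdd]; exact dif_neg h

lemma pv_reduceOdd_spec (x : Int) (h0 : 0 ≤ x) :
    0 ≤ pv_reduceOdd x ∧ pv_reduceOdd x ≤ x ∧
      (pv_reduceOdd x = 0 ∨ PySem.Int.mod (pv_reduceOdd x) 2 = 1) := by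
  rw [pv_reduceOdd]
  split_ifs with h
  · obtain ⟨mm, hm⟩ := (PySem.Int.mod_eq_zero_iff_dvd x 2).mp h.1
    rw [pv_fd2 hm]
    obtain ⟨a, b, c⟩ := pv_reduceOdd_spec mm (by omega)
    exact ⟨a, by omega, c⟩
  · refine ⟨h0, le_refl x, ?_⟩
    rcases eq_or_lt_of_le h0 with h1 | h1
    · exact Or.inl h1.symm
    · right
      rw [PySem.Int.mod_eq_emod_of_pos (by omega : (0:Int) < 2)]
      rw [PySem.Int.mod_eq_emod_of_pos (by omega : (0:Int) < 2)] at h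
      omega
termination_by x.natAbs
decreasing_by omega

lemma pv_v2go_add (n c : Int) : pv_v2go n c = pv_v2go n 0 + c := by
  rw [pv_v2go]
  conv_rhs => rw [pv_v2go]
  split_ifs with h
  · rw [pv_v2go_add (PySem.Int.floordiv n 2) (c + 1),
        pv_v2go_add (PySem.Int.floordiv n 2) (0 + 1)]
    ring
  · omega
termination_by n.natAbs
decreasing_by
  all_goals exact pv_half_lt h.1 h.2

lemma pv_v2go_nonneg (n : Int) : 0 ≤ pv_v2go n 0 := by
  rw [pv_v2go]
  split_ifs with h
  · rw [pv_v2go_add]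
    have := pv_v2go_nonneg (PySem.Int.floordiv n 2)
    omega
  · omega
termination_by n.natAbs
decreasing_by exact pv_half_lt h.1 h.2

lemma pv_syr_div (val : Int) (h : 0 < val) :
    PySem.Int.floordiv val (2 ^ (pv_v2 val).toNat) = pv_reduceOdd val := by
  rw [pv_v2, if_neg (by omega : ¬ val = 0)]
  by_cases he : PySem.Int.mod val 2 = 0
  · obtain ⟨mm, hm⟩ := (PySem.Int.mod_eq_zero_iff_dvd val 2).mp he
    have hmm : 0 < mm := by omega
    rw [pv_v2go, dif_pos ⟨he, by omega⟩, pv_fd2 hm, show (0:Int) + 1 = 1 by ring, pv_v2go_add mm 1]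
    have hnn := pv_v2go_nonneg mm
    have htn : (pv_v2go mm 0 + 1).toNat = (pv_v2go mm 0).toNat + 1 := by omega
    have hih := pv_syr_div mm hmm
    rw [pv_v2, if_neg (by omega : ¬ mm = 0)] at hih
    rw [htn]
    have hpow : (0:Int) < 2 ^ (pv_v2go mm 0).toNat := by positivity
    rw [PySem.Int.floordiv_eq_ediv_of_pos (by positivity),
        show (2:Int) ^ ((pv_v2go mm 0).toNat + 1) = 2 * 2 ^ (pv_v2go mm 0).toNat by ring,
        ← Int.ediv_ediv_of_nonneg (by omega : (0:Int) ≤ 2),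
        show val / 2 = mm by rw [← pv_fd2 hm, PySem.Int.floordiv_eq_ediv_of_pos (by omega : (0:Int) < 2)]]
    rw [PySem.Int.floordiv_eq_ediv_of_pos hpow] at hih
    rw [hih]
    conv_rhs => rw [pv_reduceOdd]
    rw [dif_pos ⟨he, h⟩, pv_fd2 hm]
  · rw [pv_v2go, dif_neg (by tauto)]
    simp only [Int.toNat_zero, pow_zero]
    rw [PySem.Int.floordiv_eq_ediv_of_pos (by omega : (0:Int) < 1), Int.ediv_one]
    rw [pv_reduceOdd, dif_neg (by tauto)]
termination_by val.natAbs
decreasing_by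
  obtain ⟨mm, hm2⟩ := (PySem.Int.mod_eq_zero_iff_dvd val 2).mp he
  omega

lemma pv_syr_eq (n m : Int) (h : 0 ≤ n) :
    pv_syracuse_mod n m = PySem.Int.mod (pvB_red (3 * n + 1)) m := by
  show PySem.Int.mod (PySem.Int.floordiv (3 * n + 1) (2 ^ (pv_v2 (3 * n + 1)).toNat)) m = _
  rw [pv_red_eq, pv_syr_div (3 * n + 1) (by omega)]

lemma pv_mod0 : PySem.Int.mod 0 2 = 0 := by decide

lemma pv_syr_bounds (x m : Int) (hm : 0 < m) :
    0 ≤ pv_syracuse_mod x m ∧ pv_syracuse_mod x m < m := by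
  show 0 ≤ PySem.Int.mod _ m ∧ PySem.Int.mod _ m < m
  exact ⟨PySem.Int.mod_nonneg _ hm, PySem.Int.mod_lt _ hm⟩

lemma pv_step_closure (m x : Int) (hm : 0 < m) :
    pvStep m x = 0 ∨ pvOddRes m (pvStep m x) := by
  obtain ⟨h1, h2⟩ := pv_syr_bounds x m hm
  obtain ⟨a, b, c⟩ := pv_reduceOdd_spec (pv_syracuse_mod x m) h1
  rcases c with c | c
  · exact Or.inl c
  · right
    have a' : 0 ≤ pvStep m x := a
    have b' : pvStep m x ≤ pv_syracuse_mod x m := b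
    have c' : PySem.Int.mod (pvStep m x) 2 = 1 := c
    have hne : pvStep m x ≠ 0 := by
      intro h0
      rw [h0, pv_mod0] at c'
      omega
    exact ⟨by omega, by omega, c'⟩

lemma pv_x2_eq (x1 : Int) :
    (if PySem.Int.mod x1 2 = 0 then pv_reduceOdd x1 else x1) = pv_reduceOdd x1 := by
  split_ifs with h
  · rfl
  · exact (pv_reduceOdd_of_not (by tauto)).symm

lemma pv_mem_odds {m x : Int} : x ∈ PySem.List.pyRange 1 m 2 ↔ pvOddRes m x := by
  rw [PySem.List.mem_pyRange_iff_of_pos (by omega : (0:Int) < 2)]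
  unfold pvOddRes
  rw [PySem.Int.mod_eq_emod_of_pos (show (0:Int) < 2 by omega)]
  omega

lemma pv_odds_nodup (m : Int) : (PySem.List.pyRange 1 m 2).Nodup := by
  rw [PySem.List.pyRange_of_pos _ _ (by omega : (0:Int) < 2)]
  exact List.Nodup.map (fun a b hab => by omega) List.nodup_range

lemma pv_table_getD {F : Int → Int} (l : List Int) (hnd : l.Nodup) {r : Int} (hr : r ∈ l) :
    PySem.Dict.getD (l.foldl (fun d r => d.insert r (F r)) PySem.Dict.empty) r 0 = F r := by
  have hitems := PySem.Dict.items_foldl_insert_fresh l (fun a => a) F PySem.Dict.empty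
    (fun a _ => by simp) (by simpa using hnd)
  apply PySem.Dict.getD_of_mem_items
  · rw [hitems]
    exact List.mem_append_right _ (List.mem_map_of_mem (f := fun a => (a, F a)) hr)
  · exact PySem.Dict.nodup_keys_foldl_insert l (fun d x => F x) PySem.Dict.empty
      PySem.Dict.nodup_keys_empty

lemma pv_tables_split (m : Int) : pvB_tables m =
    ((PySem.List.pyRange 1 m 2).foldl
       (fun (d : PySem.Dict Int Int) r => d.insert r (PySem.Int.mod (pvB_red (3 * r + 1)) m)) PySem.Dict.empty,
     (PySem.List.pyRange 1 m 2).foldl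
       (fun (d : PySem.Dict Int Int) r => d.insert r (pvB_red (PySem.Int.mod (pvB_red (3 * r + 1)) m))) PySem.Dict.empty) := by
  unfold pvB_tables
  exact PySem.List.foldl_prod_mk
    (f := fun (d : PySem.Dict Int Int) r => d.insert r (PySem.Int.mod (pvB_red (3 * r + 1)) m))
    (g := fun (d : PySem.Dict Int Int) r => d.insert r (pvB_red (PySem.Int.mod (pvB_red (3 * r + 1)) m))) _ _ _

lemma pv_tables_getD (m r : Int) (hr : r ∈ PySem.List.pyRange 1 m 2) :
    PySem.Dict.getD (pvB_tables m).1 r 0 = pv_syracuse_mod r m ∧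
    PySem.Dict.getD (pvB_tables m).2 r 0 = pvStep m r := by
  have hodd := pv_mem_odds.mp hr
  have hr0 : 0 ≤ r := by
    rcases hodd with ⟨h1, _, _⟩; omega
  rw [pv_tables_split]
  constructor
  · rw [pv_table_getD _ (pv_odds_nodup m) hr, ← pv_syr_eq r m hr0]
  · rw [pv_table_getD _ (pv_odds_nodup m) hr, pv_red_eq, ← pv_syr_eq r m hr0]
    rfl

lemma pv_gen_eq (d : PySem.Dict Int Int) (l : List Int) (x : Int) (acc : List Int) :
    l.foldl (fun (p : Int × List Int) _ =>
        (PySem.Dict.getD d p.1 0, PySem.Dict.getD d p.1 0 :: p.2)) (x, acc)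
      = ((fun y => PySem.Dict.getD d y 0)^[l.length] x,
         (pvChain (fun y => PySem.Dict.getD d y 0) x l.length).reverse ++ acc) := by
  induction l generalizing x acc with
  | nil => simp [pvChain]
  | cons a t ih =>
    simp only [List.foldl_cons, List.length_cons, ih, pvChain, Function.iterate_succ_apply,
      List.reverse_cons, List.append_assoc, List.singleton_append]

lemma pv_steps_eq (n : Nat) (t : Int) : PySem.List.pyRange t (t + n) 1 = pvSteps t n := by
  induction n generalizing t with
  | zero => exact PySem.List.pyRange_one_eq_nil (by omega)
  | succ n ih =>
    rw [PySem.List.pyRange_one_cons (by omega : t < t + (n + 1 : Nat)),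
        show t + ((n + 1 : Nat) : Int) = (t + 1) + (n : Nat) by push_cast; ring, ih]
    rfl

lemma pv_inner_eq (m r : Int) (g : PySem.Dict Int Int) (hm : 0 < m)
    (hg : ∀ x, pvOddRes m x → PySem.Dict.getD g x 0 = pvStep m x) :
    ∀ (n : Nat) (n' : Nat) (pre : List Int) (x : Int) (seen : PySem.Dict Int Int)
      (orbit : List Int) (periodic : PySem.Dict Int (List Int)),
      n' ≤ n →
      (n' = n ∨ pre.length + n' = (PySem.List.pyRange 1 m 2).length + 1) →
      pvOddRes m x →
      pre.Nodup →
      (∀ v ∈ pre, pvOddRes m v) →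
      (∀ v, PySem.Dict.get? seen v = (PySem.List.index? pre v).map (fun i => (i : Int))) →
      pv_innerA m r (pvSteps (pre.length : Int) n) x seen orbit periodic
        = pvB_scan r (pvChain (fun y => PySem.Dict.getD g y 0) x n') pre periodic := by
  intro n
  induction n with
  | zero =>
    intro n' _ _ _ _ _ hle _ _ _ _ _
    have : n' = 0 := Nat.le_zero.mp hle
    subst this
    rfl
  | succ n ih =>
    intro n' pre x seen orbit periodic hle hcap hx hnd hpre hseen
    cases n' with
    | zero =>
      rcases hcap with h | h
      · exact absurd h.symm (Nat.succ_ne_zero n)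
      · exfalso
        have hsub : pre ⊆ PySem.List.pyRange 1 m 2 := fun v hv => pv_mem_odds.mpr (hpre v hv)
        have := (List.subperm_of_subset hnd hsub).length_le
        omega
    | succ n'
    have hgx : PySem.Dict.getD g x 0 = pvStep m x := hg x hx
    simp only [pvSteps, pvChain, pv_innerA, pvB_scan]
    rw [pv_x2_eq]
    have hps : pv_reduceOdd (pv_syracuse_mod x m) = pvStep m x := rfl
    rw [hps, hgx]
    by_cases h0 : pvStep m x = 0
    · rw [if_pos h0, if_pos h0]
    · rw [if_neg h0, if_neg h0]
      rcases pv_step_closure m x hm with hc | hc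
      · exact absurd hc h0
      rw [hseen (pvStep m x)]
      by_cases hmem : pvStep m x ∈ pre
      · obtain ⟨i, hi⟩ := Option.isSome_iff_exists.mp
          ((PySem.List.index?_isSome_iff pre (pvStep m x)).mpr hmem)
        rw [hi, if_pos hmem]
        rfl
      · have hnone : PySem.List.index? pre (pvStep m x) = none :=
          (PySem.List.index?_eq_none_iff pre (pvStep m x)).mpr hmem
        rw [hnone, if_neg hmem]
        have hlen' : ((pre ++ [pvStep m x]).length : Int) = (pre.length : Int) + 1 := by
          simp [List.length_append]
        have hinv : ∀ v, PySem.Dict.get? (PySem.Dict.insert seen (pvStep m x) (pre.length : Int)) v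
            = (PySem.List.index? (pre ++ [pvStep m x]) v).map (fun i => (i : Int)) := by
          intro v
          rw [PySem.Dict.get?_insert]
          by_cases hv : v = pvStep m x
          · subst hv
            rw [if_pos rfl, PySem.List.index?_append_singleton_self pre (pvStep m x) hmem]
            rfl
          · rw [if_neg hv, hseen v]
            by_cases hvp : v ∈ pre
            · rw [PySem.List.index?_append_of_mem _ hvp]
            · rw [(PySem.List.index?_eq_none_iff _ _).mpr hvp,
                  (PySem.List.index?_eq_none_iff _ _).mpr (by simp [hvp, hv])]
        have hnd' : (pre ++ [pvStep m x]).Nodup := by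
          rw [← List.concat_eq_append]
          exact hnd.concat hmem
        have hpre' : ∀ v ∈ pre ++ [pvStep m x], pvOddRes m v := by
          intro v hv
          rcases List.mem_append.mp hv with hv | hv
          · exact hpre v hv
          · rw [List.mem_singleton.mp hv]; exact hc
        have := ih n' (pre ++ [pvStep m x]) (pvStep m x)
          (PySem.Dict.insert seen (pvStep m x) (pre.length : Int)) (orbit ++ [pvStep m x])
          periodic (by omega)
          (hcap.imp (fun h => by omega) (fun h => by simp only [List.length_append]; simp at h ⊢; omega))
          hc hnd' hpre' hinv
        rw [hlen'] at this
        exact this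


lemma pv_main (m mp : Int) (hm : 0 < m) :
    ((((PySem.List.pyRange 1 m 2).foldl
        (fun (acc : List Int × PySem.Dict Int (List Int)) r =>
          (if pv_syracuse_mod r m = r then acc.1 ++ [r] else acc.1,
           pv_innerA m r (PySem.List.pyRange 1 (mp + 1) 1) r
             (PySem.Dict.insert PySem.Dict.empty r 0) [r] acc.2))
        ([], PySem.Dict.empty)).1,
     (((PySem.List.pyRange 1 m 2).foldl
        (fun (acc : List Int × PySem.Dict Int (List Int)) r =>
          (if pv_syracuse_mod r m = r then acc.1 ++ [r] else acc.1,
           pv_innerA m r (PySem.List.pyRange 1 (mp + 1) 1) r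
             (PySem.Dict.insert PySem.Dict.empty r 0) [r] acc.2))
        ([], PySem.Dict.empty)).2).items)
    = ((PySem.List.pyRange 1 m 2).filter (fun r => PySem.Dict.getD (pvB_tables m).1 r 0 == r),
       (((PySem.List.pyRange 1 m 2).foldl
          (fun (periodic : PySem.Dict Int (List Int)) r =>
            pvB_scan r (PySem.List.slice ((((PySem.List.pyRange 0 (min mp (PySem.Int.floordiv m 2)) 1).foldl
            (fun (p : Int × List Int) _ =>
              (PySem.Dict.getD (pvB_tables m).2 p.1 0, PySem.Dict.getD (pvB_tables m).2 p.1 0 :: p.2))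
            (r, [r])).2).reverse) (some 1) none)
              [PySem.List.pyGetD ((((PySem.List.pyRange 0 (min mp (PySem.Int.floordiv m 2)) 1).foldl
            (fun (p : Int × List Int) _ =>
              (PySem.Dict.getD (pvB_tables m).2 p.1 0, PySem.Dict.getD (pvB_tables m).2 p.1 0 :: p.2))
            (r, [r])).2).reverse) 0 0] periodic)
          PySem.Dict.empty)).items)) := by
  have hsplit : (PySem.List.pyRange 1 m 2).foldl
      (fun (acc : List Int × PySem.Dict Int (List Int)) r =>
        (if pv_syracuse_mod r m = r then acc.1 ++ [r] else acc.1,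
         pv_innerA m r (PySem.List.pyRange 1 (mp + 1) 1) r
           (PySem.Dict.insert PySem.Dict.empty r 0) [r] acc.2))
      ([], PySem.Dict.empty)
      = ((PySem.List.pyRange 1 m 2).foldl
           (fun fx r => if pv_syracuse_mod r m = r then fx ++ [r] else fx) [],
         (PySem.List.pyRange 1 m 2).foldl
           (fun pd r => pv_innerA m r (PySem.List.pyRange 1 (mp + 1) 1) r
             (PySem.Dict.insert PySem.Dict.empty r 0) [r] pd) PySem.Dict.empty) :=
    PySem.List.foldl_prod_mk
      (f := fun fx r => if pv_syracuse_mod r m = r then fx ++ [r] else fx)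
      (g := fun pd r => pv_innerA m r (PySem.List.pyRange 1 (mp + 1) 1) r
        (PySem.Dict.insert PySem.Dict.empty r 0) [r] pd) _ _ _
  have hfix : (PySem.List.pyRange 1 m 2).foldl
      (fun fx r => if pv_syracuse_mod r m = r then fx ++ [r] else fx) []
      = (PySem.List.pyRange 1 m 2).filter (fun r => PySem.Dict.getD (pvB_tables m).1 r 0 == r) := by
    rw [PySem.List.foldl_append_ite_eq_filter (p := fun r => pv_syracuse_mod r m = r)]
    rw [List.nil_append]
    apply List.filter_congr
    intro r hr
    rw [(pv_tables_getD m r hr).1]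
    by_cases h : pv_syracuse_mod r m = r <;> simp [h]
  have hlen : (PySem.List.pyRange 0 (min mp (PySem.Int.floordiv m 2)) 1).length
      = (min mp (PySem.Int.floordiv m 2)).toNat := by
    rw [PySem.List.length_pyRange_of_pos _ _ (by omega : (0:Int) < 1)]
    split_ifs with h
    · rw [show min mp (PySem.Int.floordiv m 2) - 0 + 1 - 1 = min mp (PySem.Int.floordiv m 2) by ring,
          Int.ediv_one]
    · omega
  have hper : (PySem.List.pyRange 1 m 2).foldl
      (fun pd r => pv_innerA m r (PySem.List.pyRange 1 (mp + 1) 1) r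
        (PySem.Dict.insert PySem.Dict.empty r 0) [r] pd) PySem.Dict.empty
      = (PySem.List.pyRange 1 m 2).foldl
          (fun (periodic : PySem.Dict Int (List Int)) r =>
            pvB_scan r (PySem.List.slice ((((PySem.List.pyRange 0 (min mp (PySem.Int.floordiv m 2)) 1).foldl
            (fun (p : Int × List Int) _ =>
              (PySem.Dict.getD (pvB_tables m).2 p.1 0, PySem.Dict.getD (pvB_tables m).2 p.1 0 :: p.2))
            (r, [r])).2).reverse) (some 1) none)
              [PySem.List.pyGetD ((((PySem.List.pyRange 0 (min mp (PySem.Int.floordiv m 2)) 1).foldl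
            (fun (p : Int × List Int) _ =>
              (PySem.Dict.getD (pvB_tables m).2 p.1 0, PySem.Dict.getD (pvB_tables m).2 p.1 0 :: p.2))
            (r, [r])).2).reverse) 0 0] periodic)
          PySem.Dict.empty := by
    apply PySem.List.foldl_congr_mem
    intro pd r hr
    have hodd := pv_mem_odds.mp hr
    have hgen := pv_gen_eq (pvB_tables m).2 (PySem.List.pyRange 0 (min mp (PySem.Int.floordiv m 2)) 1) r [r]
    rw [hgen, hlen]
    simp only [List.reverse_append, List.reverse_reverse, List.reverse_cons, List.reverse_nil,
      List.nil_append, List.singleton_append, PySem.List.slice_from_one, List.tail_cons,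
      PySem.List.pyGetD_ofNat', List.getD_cons_zero]
    have hsteps : PySem.List.pyRange 1 (mp + 1) 1 = pvSteps ((([r] : List Int).length : Int)) mp.toNat := by
      rw [show ((([r] : List Int).length : Nat) : Int) = 1 by simp]
      by_cases hmp : 0 ≤ mp
      · rw [show mp + 1 = 1 + (mp.toNat : Int) by omega, pv_steps_eq]
      · rw [PySem.List.pyRange_one_eq_nil (by omega), show mp.toNat = 0 by omega]
        rfl
    rw [hsteps]
    have hq : PySem.Int.floordiv m 2 = m / 2 := PySem.Int.floordiv_eq_ediv_of_pos (by omega)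
    have hm2 : 2 ≤ m := by rcases hodd with ⟨h1, h2, _⟩; omega
    have hodds : (PySem.List.pyRange 1 m 2).length = (m / 2).toNat := by
      rw [PySem.List.length_pyRange_of_pos _ _ (by omega : (0:Int) < 2),
          if_pos (by omega : (1:Int) < m), show m - 1 + 2 - 1 = m by ring]
    apply pv_inner_eq m r (pvB_tables m).2 hm
      (fun x hx => (pv_tables_getD m x (pv_mem_odds.mpr hx)).2) mp.toNat
      (min mp (PySem.Int.floordiv m 2)).toNat [r] r _ [r] pd
      (by rw [hq]; omega)
      (by rw [hq, hodds]
          by_cases hc : mp ≤ m / 2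
          · left; omega
          · right; simp only [List.length_singleton]; omega)
      hodd (by simp) (by intro v hv; rw [List.mem_singleton.mp hv]; exact hodd)
    intro v
    rw [PySem.Dict.get?_insert]
    by_cases hv : v = r
    · subst hv
      rw [if_pos rfl, PySem.List.index?_cons_self]
      rfl
    · rw [if_neg hv, PySem.List.index?_cons_of_ne _ (fun h => hv h.symm),
          (PySem.List.index?_eq_none_iff _ _).mpr (List.not_mem_nil)]
      simp [PySem.Dict.get?_empty]
  rw [hsplit, hfix, hper]

-- ===== VERDICT (by name: the statement is the Claim_ definition above) =====
theorem find_fixed_and_periodic_spec : Claim_equal_find_fixed_and_periodic := by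
  intro k max_period _hdom _hpre
  unfold Spec_find_fixed_and_periodic
  exact pv_main ((2 : Int) ^ k.toNat) max_period (by positivity)
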